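-- pv_equiv track=rewrite | github.com/csu-signal/TRACE | mmdemo/features/move/move_classifier.py | change_window_size
-- ===== SOURCE A (Python) =====
-- def change_window_size(train_list, window_size):
--     rec_train_list = []
--     pad = [[0] * len(train_list[0][0]), [0] * len(train_list[0][1])]
--
--     for utt_id in range(len(train_list)):
--         aux = []
--         for i in range(window_size):
--             if utt_id == i:
--                 for _ in range(window_size - utt_id):
--                     aux.append(pad)
--         for i in range(window_size):
--             if len(aux) == i:
--                 aux.append(train_list[utt_id - window_size + i])
--         aux.append(train_list[utt_id])
--         rec_train_list.append(aux)
--     return rec_train_list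
-- ===== SOURCE B (Python) =====
-- def change_window_size(train_list, window_size):
--     pad = [[0] * len(train_list[0][0]), [0] * len(train_list[0][1])]
--     rec_train_list = []
--     for utt_id in range(len(train_list)):
--         window = [pad if j < 0 else train_list[j]
--                   for j in range(utt_id - window_size, utt_id)]
--         window.append(train_list[utt_id])
--         rec_train_list.append(window)
--     return rec_train_list
-- ===== Notes on version B (the rewrite author's own statement) =====
-- stated objective: simpler
-- what changed: Replaces A's three sequential inner loops (a pad loop guarded by utt_id==i, a fill loop guarded by len(aux)==i, then the final append) with a single comprehension over the index range utt_id-window_size..utt_id-1 that picks pad for negative indices, plus the trailing current element.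
import Mathlib
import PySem

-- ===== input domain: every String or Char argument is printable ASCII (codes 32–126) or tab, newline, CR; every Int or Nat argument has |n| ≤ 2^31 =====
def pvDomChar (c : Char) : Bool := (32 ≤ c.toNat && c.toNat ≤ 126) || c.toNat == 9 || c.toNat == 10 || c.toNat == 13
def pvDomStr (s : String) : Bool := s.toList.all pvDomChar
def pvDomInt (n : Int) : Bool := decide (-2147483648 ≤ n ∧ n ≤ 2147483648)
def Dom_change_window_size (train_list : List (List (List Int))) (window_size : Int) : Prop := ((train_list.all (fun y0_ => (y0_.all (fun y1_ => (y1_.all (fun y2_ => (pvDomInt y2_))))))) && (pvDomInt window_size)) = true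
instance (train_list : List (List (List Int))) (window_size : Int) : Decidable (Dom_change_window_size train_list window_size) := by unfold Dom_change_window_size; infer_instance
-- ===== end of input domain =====

-- B replaces A's three sequential inner loops with one comprehension over the index range
-- utt_id-window_size..utt_id-1 (pad for negative indices) plus the trailing current element: simpler.

-- ===== PORT A =====
def change_window_size (train_list : List (List (List Int))) (window_size : Int) : List (List (List (List Int))) :=
  -- pad = [[0]*len(train_list[0][0]), [0]*len(train_list[0][1])]
  let pad : List (List Int) :=
    [List.replicate (PySem.List.pyGetD (PySem.List.pyGetD train_list 0 []) 0 []).length 0,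
     List.replicate (PySem.List.pyGetD (PySem.List.pyGetD train_list 0 []) 1 []).length 0]
  (List.range train_list.length).foldl (fun rec_train_list utt_id =>
    -- first inner loop: pads when utt_id == i
    let aux1 := (PySem.List.pyRange 0 window_size 1).foldl
      (fun aux i => if (utt_id : Int) = i then aux ++ List.replicate (window_size - utt_id).toNat pad else aux) []
    -- second inner loop: fills when len(aux) == i
    let aux2 := (PySem.List.pyRange 0 window_size 1).foldl
      (fun aux i => if (aux.length : Int) = i then aux ++ [PySem.List.pyGetD train_list ((utt_id : Int) - window_size + i) []] else aux) aux1
    rec_train_list ++ [aux2 ++ [PySem.List.pyGetD train_list (utt_id : Int) []]]) []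

-- ===== PORT B =====
def change_window_size_alt (train_list : List (List (List Int))) (window_size : Int) : List (List (List (List Int))) :=
  let pad : List (List Int) :=
    [List.replicate (PySem.List.pyGetD (PySem.List.pyGetD train_list 0 []) 0 []).length 0,
     List.replicate (PySem.List.pyGetD (PySem.List.pyGetD train_list 0 []) 1 []).length 0]
  (List.range train_list.length).map (fun utt_id =>
    ((PySem.List.pyRange ((utt_id : Int) - window_size) (utt_id : Int) 1).map
      (fun j => if j < 0 then pad else PySem.List.pyGetD train_list j []))
    ++ [PySem.List.pyGetD train_list (utt_id : Int) []])

-- ===== PRECONDITION & SPEC =====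
-- Pre_ excludes exactly the inputs where Python A raises IndexError while computing pad
-- (empty train_list, or train_list[0] with fewer than 2 entries); B raises identically there.
def Pre_change_window_size (train_list : List (List (List Int))) (window_size : Int) : Prop :=
  train_list ≠ [] ∧ 2 ≤ (train_list.headD []).length
instance (train_list : List (List (List Int))) (window_size : Int) : Decidable (Pre_change_window_size train_list window_size) := by unfold Pre_change_window_size; infer_instance

def pvWitness_change_window_size : List (List (List Int)) × Int := ([[[1], [2, 3]], [[4], [5, 6]]], 2)

def Spec_change_window_size (train_list : List (List (List Int))) (window_size : Int) (out : List (List (List (List Int)))) : Prop := out = change_window_size_alt train_list window_size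
instance (train_list : List (List (List Int))) (window_size : Int) (out : List (List (List (List Int)))) : Decidable (Spec_change_window_size train_list window_size out) := by unfold Spec_change_window_size; infer_instance

-- ===== CLAIM (what is proved, stated in full; the proofs are below) =====
def Claim_equal_change_window_size : Prop := ∀ (train_list : List (List (List Int))) (window_size : Int), Dom_change_window_size train_list window_size → Pre_change_window_size train_list window_size → Spec_change_window_size train_list window_size (change_window_size train_list window_size)

-- ===== LEMMAS AND PROOFS =====

lemma padloopAux {X : Type} (pad : X) (u w : Int) :
    ∀ (n : Nat) (a : Int), (w - a).toNat ≤ n → ∀ (st : List X),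
      (PySem.List.pyRange a w 1).foldl
        (fun aux i => if u = i then aux ++ List.replicate (w - u).toNat pad else aux) st
      = if a ≤ u ∧ u < w then st ++ List.replicate (w - u).toNat pad else st := by
  intro n
  induction n with
  | zero =>
    intro a h st
    rw [PySem.List.pyRange_one_eq_nil (by omega), if_neg (by omega)]
    rfl
  | succ n ih =>
    intro a h st
    by_cases hw : w ≤ a
    · rw [PySem.List.pyRange_one_eq_nil hw, if_neg (by omega)]
      rfl
    · rw [not_le] at hw
      rw [PySem.List.pyRange_one_cons hw, List.foldl_cons]
      rw [ih (a + 1) (by omega)]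
      by_cases hu : u = a
      · rw [if_pos hu, if_neg (by omega), if_pos (by omega)]
      · rw [if_neg hu]
        by_cases hc : a + 1 ≤ u ∧ u < w
        · rw [if_pos hc, if_pos (by omega)]
        · rw [if_neg hc, if_neg (by omega)]

lemma fillloopAux {X : Type} (g : Int → X) (w : Int) :
    ∀ (n : Nat) (a : Int), (w - a).toNat ≤ n → ∀ (st : List X), a ≤ (st.length : Int) →
      (PySem.List.pyRange a w 1).foldl
        (fun s i => if (s.length : Int) = i then s ++ [g i] else s) st
      = st ++ (PySem.List.pyRange (st.length : Int) w 1).map g := by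
  intro n
  induction n with
  | zero =>
    intro a h st hle
    rw [PySem.List.pyRange_one_eq_nil (by omega), PySem.List.pyRange_one_eq_nil (by omega)]
    simp
  | succ n ih =>
    intro a h st hle
    by_cases hw : w ≤ a
    · rw [PySem.List.pyRange_one_eq_nil hw, PySem.List.pyRange_one_eq_nil (by omega)]
      simp
    · rw [not_le] at hw
      rw [PySem.List.pyRange_one_cons hw, List.foldl_cons]
      by_cases hl : (st.length : Int) = a
      · rw [if_pos hl]
        rw [ih (a + 1) (by omega) _ (by simp; omega)]
        rw [hl, PySem.List.pyRange_one_cons hw, List.map_cons]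
        simp [hl]
      · rw [if_neg hl]
        rw [ih (a + 1) (by omega) _ (by omega)]

lemma window_eq (tl : List (List (List Int))) (pad : List (List Int)) (w u : Int) (hu : 0 ≤ u) :
    (PySem.List.pyRange 0 w 1).foldl
      (fun aux i => if (aux.length : Int) = i then aux ++ [PySem.List.pyGetD tl (u - w + i) []] else aux)
      ((PySem.List.pyRange 0 w 1).foldl
        (fun aux i => if u = i then aux ++ List.replicate (w - u).toNat pad else aux) [])
    = (PySem.List.pyRange (u - w) u 1).map
        (fun j => if j < 0 then pad else PySem.List.pyGetD tl j []) := by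
  rw [padloopAux pad u w (w - 0).toNat 0 (le_refl _)]
  by_cases hc : (0:Int) ≤ u ∧ u < w
  · rw [if_pos hc]
    simp only [List.nil_append]
    rw [fillloopAux _ w (w - 0).toNat 0 (le_refl _) _ (by simp)]
    have hlen : ((List.replicate (w - u).toNat pad).length : Int) = w - u := by
      simp; omega
    rw [hlen]
    -- B side split at 0
    rw [PySem.List.pyRange_one_append (u - w) 0 u (by omega) (by omega), List.map_append]
    congr 1
    · -- pads: map const over pyRange (u-w) 0 1 = replicate (w-u).toNat pad
      rw [List.map_congr_left (fun j hj => if_pos (by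
          have := (PySem.List.mem_pyRange_one).1 hj; omega))]
      rw [List.map_const', PySem.List.length_pyRange_one]
      congr 1
      omega
    · -- entries
      rw [PySem.List.pyRange_one (w - u) w, PySem.List.pyRange_one 0 u, List.map_map, List.map_map]
      have : (w - (w - u)).toNat = (u - 0).toNat := by omega
      rw [this]
      apply List.map_congr_left
      intro k hk
      simp only [Function.comp_apply]
      rw [if_neg (by omega)]
      congr 1
      omega
  · rw [if_neg hc]
    have hw : w ≤ 0 ∨ w ≤ u := by omega
    rcases hw with hw | hw
    · rw [PySem.List.pyRange_one_eq_nil hw, PySem.List.pyRange_one_eq_nil (by omega)]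
      rfl
    · rw [fillloopAux _ w (w - 0).toNat 0 (le_refl _) _ (by simp)]
      simp only [List.length_nil, Nat.cast_zero, List.nil_append]
      rw [PySem.List.pyRange_one 0 w, PySem.List.pyRange_one (u - w) u, List.map_map, List.map_map]
      have : (w - 0).toNat = (u - (u - w)).toNat := by omega
      rw [this]
      apply List.map_congr_left
      intro k hk
      simp only [Function.comp_apply]
      rw [if_neg (by
        simp only [List.mem_range] at hk
        omega)]
      congr 1
      omega

-- ===== VERDICT (by name: the statement is the Claim_ definition above) =====
theorem change_window_size_spec : Claim_equal_change_window_size := by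
  intro train_list window_size _ _
  unfold Spec_change_window_size change_window_size change_window_size_alt
  simp only []
  rw [PySem.List.foldl_append_singleton_eq_map]
  simp only [List.nil_append]
  refine List.map_congr_left (fun u hu => ?_)
  have h0 : (0:Int) ≤ u := by
    simp at hu
    obtain ⟨n, -, rfl⟩ := hu
    exact Int.natCast_nonneg n
  rw [window_eq _ _ _ _ h0]
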